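-- pv_equiv track=rewrite | github.com/antonpictures/ANTON-SIFTA | System/swarm_stigmergic_dialogue.py | _convo_residue
-- ===== SOURCE A (Python) =====
-- from typing import Any, Dict, List, Optional, Tuple
--
-- def _convo_residue(state: Dict[str, Any]) -> str:
--     convo = state.get("conversation", []) or []
--     last_user = ""
--     for row in reversed(convo):
--         if row.get("role") == "user" and row.get("text"):
--             last_user = str(row["text"])[:60].strip()
--             break
--     if not last_user:
--         return "It was quiet."
--     # First few words as a residue echo
--     snippet = " ".join(last_user.split()[:5]).rstrip(",.;:!?")
--     return f"You said '{snippet}'."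
-- ===== SOURCE B (Python) =====
-- def _convo_residue(state):
--     convo = state.get("conversation", []) or []
--     snippets = [str(r["text"])[:60].strip()
--                 for r in convo
--                 if r.get("role") == "user" and r.get("text")]
--     last_user = snippets[-1] if snippets else ""
--     if not last_user:
--         return "It was quiet."
--     snippet = " ".join(last_user.split()[:5])
--     while snippet and snippet[-1] in ",.;:!?":
--         snippet = snippet[:-1]
--     return f"You said '{snippet}'."
-- ===== Notes on version B (the rewrite author's own statement) =====
-- stated objective: alternative
-- what changed: Replaces the reversed() scan with early break by a comprehension collecting all user snippets and taking the last one, and replaces rstrip(",.;:!?") by an explicit while loop chopping trailing punctuation.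
import Mathlib
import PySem

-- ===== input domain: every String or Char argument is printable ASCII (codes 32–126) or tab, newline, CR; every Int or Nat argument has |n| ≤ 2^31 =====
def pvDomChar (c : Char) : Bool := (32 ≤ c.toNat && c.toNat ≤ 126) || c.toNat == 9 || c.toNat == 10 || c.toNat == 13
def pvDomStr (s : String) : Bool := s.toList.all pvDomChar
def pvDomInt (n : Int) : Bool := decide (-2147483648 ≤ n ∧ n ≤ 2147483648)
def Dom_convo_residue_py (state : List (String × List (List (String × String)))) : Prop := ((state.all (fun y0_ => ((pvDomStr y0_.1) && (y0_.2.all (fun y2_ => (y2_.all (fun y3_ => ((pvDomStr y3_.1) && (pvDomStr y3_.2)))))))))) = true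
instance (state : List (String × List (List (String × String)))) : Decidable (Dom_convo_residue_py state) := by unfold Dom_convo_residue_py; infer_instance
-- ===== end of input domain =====

-- B collects every user snippet with a comprehension and takes the last, and chops trailing
-- punctuation with an explicit while loop instead of rstrip (same values; not faster).

-- ===== PORT A =====
-- s.rstrip(",.;:!?") — hand port (right-only strip over a char set); exact:
-- drop from the right exactly the trailing chars belonging to the set.
def pvRstripPunct (s : String) : String :=
  String.ofList ((s.toList.reverse.dropWhile (fun c => (",.;:!?".toList).contains c)).reverse)

-- 'for row in reversed(convo): if …: last_user = …; break' — first match of the reversed list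
def pvA_loop : List (List (String × String)) → String
  | [] => ""
  | row :: rest =>
    if ((PySem.Dict.mk row).get? "role" == some "user")
        && (match (PySem.Dict.mk row).get? "text" with
            | some t => !(t == "")      -- Python truthiness of row.get("text")
            | none => false) then
      PySem.Str.strip (PySem.Str.slice ((PySem.Dict.mk row).getD "text" "") none (some 60))
    else pvA_loop rest

def convo_residue_py (state : List (String × List (List (String × String)))) : String :=
  let convo0 := (PySem.Dict.mk state).getD "conversation" []
  let convo := if convo0.isEmpty then [] else convo0    -- 'or []'
  let last_user := pvA_loop convo.reverse
  if last_user == "" then "It was quiet."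
  else "You said '" ++
    pvRstripPunct (PySem.Str.join " " ((PySem.Str.split₀ last_user).take 5)) ++ "'."

-- ===== PORT B =====
-- the comprehension's filter+map body: Some snippet for a user row with truthy text
def pvSnippet? (row : List (String × String)) : Option String :=
  if ((PySem.Dict.mk row).get? "role" == some "user")
      && (match (PySem.Dict.mk row).get? "text" with
          | some t => !(t == "")
          | none => false) then
    some (PySem.Str.strip (PySem.Str.slice ((PySem.Dict.mk row).getD "text" "") none (some 60)))
  else none

-- 'while snippet and snippet[-1] in ",.;:!?": snippet = snippet[:-1]' — each iteration
-- removes the last char; ported as structural recursion on the reversed char list (exact).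
def pvChopRev : List Char → List Char
  | [] => []
  | c :: rest => if (",.;:!?".toList).contains c then pvChopRev rest else c :: rest

def convo_residue_py_alt (state : List (String × List (List (String × String)))) : String :=
  let convo0 := (PySem.Dict.mk state).getD "conversation" []
  let convo := if convo0.isEmpty then [] else convo0    -- 'or []'
  let snippets := convo.filterMap pvSnippet?
  let last_user := match snippets.getLast? with | some s => s | none => ""
  if last_user == "" then "It was quiet."
  else
    let joined := PySem.Str.join " " ((PySem.Str.split₀ last_user).take 5)
    "You said '" ++ String.ofList ((pvChopRev joined.toList.reverse).reverse) ++ "'."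

-- ===== PRECONDITION & SPEC =====
def Spec_convo_residue_py (state : List (String × List (List (String × String)))) (out : String) : Prop := out = convo_residue_py_alt state
instance (state : List (String × List (List (String × String)))) (out : String) : Decidable (Spec_convo_residue_py state out) := by unfold Spec_convo_residue_py; infer_instance

-- ===== CLAIM (what is proved, stated in full; the proofs are below) =====
def Claim_equal_convo_residue_py : Prop := ∀ (state : List (String × List (List (String × String)))), Dom_convo_residue_py state → Spec_convo_residue_py state (convo_residue_py state)

-- ===== LEMMAS AND PROOFS =====

-- A's reverse-and-break loop is the first pvSnippet? hit of its argument
lemma pvA_loop_eq_findSome? (l : List (List (String × String))) :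
    pvA_loop l = (l.findSome? pvSnippet?).getD "" := by
  have key : ∀ row rest, pvA_loop (row :: rest) =
      (match pvSnippet? row with | some s => s | none => pvA_loop rest) := by
    intro row rest
    rw [pvA_loop, pvSnippet?]
    split <;> split <;> rfl
  induction l with
  | nil => rfl
  | cons row rest ih =>
    rw [key, List.findSome?_cons]
    cases pvSnippet? row <;> simp [ih]

-- the first hit of a list is the head of its filterMap
lemma findSome?_eq_head?_filterMap (g : List (String × String) → Option String)
    (l : List (List (String × String))) :
    l.findSome? g = (l.filterMap g).head? := by
  induction l with
  | nil => rfl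
  | cons row rest ih =>
    rw [List.findSome?_cons, List.filterMap_cons]
    cases g row with
    | none => exact ih
    | some s => rfl

-- the while-loop chop equals the dropWhile used in A's rstrip port
lemma pvChopRev_eq_dropWhile (cs : List Char) :
    pvChopRev cs = cs.dropWhile (fun c => (",.;:!?".toList).contains c) := by
  induction cs with
  | nil => rfl
  | cons c rest ih =>
    rw [pvChopRev, List.dropWhile]
    cases h : (",.;:!?".toList).contains c
    · simp only [cond_false, if_neg Bool.false_ne_true]
    · simp only [ih]
      exact if_pos trivial

-- ===== VERDICT (by name: the statement is the Claim_ definition above) =====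
theorem convo_residue_py_spec : Claim_equal_convo_residue_py := by
  intro state _
  unfold Spec_convo_residue_py
  simp only [convo_residue_py, convo_residue_py_alt, pvRstripPunct]
  rw [pvA_loop_eq_findSome?, findSome?_eq_head?_filterMap, List.filterMap_reverse,
    List.head?_reverse, pvChopRev_eq_dropWhile]
  cases (((if ((PySem.Dict.mk state).getD "conversation" []).isEmpty then []
      else (PySem.Dict.mk state).getD "conversation" []) : List (List (String × String))).filterMap
      pvSnippet?).getLast? <;> rfl
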